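-- pv_equiv track=rewrite | github.com/Nowazish-Nur-Kayef/NanoDS | scripts/bundle.py | extract_main_header_start
-- ===== SOURCE A (Python) =====
-- def extract_main_header_start(content):
--     """Extract the starting portion of main header up to the includes"""
--     lines = content.split('\n')
--     result = []
--
--     for i, line in enumerate(lines):
--         # Stop before the first #include "src/
--         if '#include "src/' in line:
--             break
--         result.append(line)
--
--     return '\n'.join(result)
-- ===== SOURCE B (Python) =====
-- def extract_main_header_start(content):
--     """Extract the starting portion of main header up to the includes"""
--     p = content.find('#include "src/')
--     if p == -1:
--         return content
--     ls = content.rfind('\n', 0, p) + 1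
--     if ls == 0:
--         return ''
--     return content[:ls - 1]
-- ===== Notes on version B (the rewrite author's own statement) =====
-- stated objective: alternative
-- what changed: Replaces the split-into-lines loop with a direct substring search: find the first marker occurrence, rfind the preceding newline, and return the slice before it.
import Mathlib
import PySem

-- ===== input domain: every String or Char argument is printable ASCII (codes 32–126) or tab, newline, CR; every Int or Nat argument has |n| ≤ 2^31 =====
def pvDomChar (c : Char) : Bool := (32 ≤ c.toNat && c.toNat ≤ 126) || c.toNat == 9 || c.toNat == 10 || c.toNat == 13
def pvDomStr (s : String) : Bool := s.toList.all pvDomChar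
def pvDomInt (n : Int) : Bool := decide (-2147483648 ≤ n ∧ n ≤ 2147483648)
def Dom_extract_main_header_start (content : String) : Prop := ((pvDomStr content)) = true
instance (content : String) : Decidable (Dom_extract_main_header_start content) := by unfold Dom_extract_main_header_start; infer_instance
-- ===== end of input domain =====

-- B replaces A's split-into-lines loop by a direct substring search (find the marker,
-- rfind the preceding newline, slice); same result, different decomposition ("alternative").

-- ===== PORT A =====
-- the loop `for line in lines: if marker in line: break; result.append(line)`
def pvLoopA : List String → List String
  | [] => []
  | l :: ls => if PySem.Str.isIn "#include \"src/" l then [] else l :: pvLoopA ls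

def extract_main_header_start (content : String) : String :=
  let lines := (PySem.Str.split? content "\n").getD []
  PySem.Str.join "\n" (pvLoopA lines)

-- ===== PORT B =====
def extract_main_header_start_alt (content : String) : String :=
  let p := PySem.Str.find content "#include \"src/"
  if p = -1 then content
  else
    let ls := PySem.Str.rfindFrom content "\n" 0 (some p) + 1
    if ls = 0 then "" else PySem.Str.slice content none (some (ls - 1))

-- ===== PRECONDITION & SPEC =====
def Spec_extract_main_header_start (content : String) (out : String) : Prop := out = extract_main_header_start_alt content
instance (content : String) (out : String) : Decidable (Spec_extract_main_header_start content out) := by unfold Spec_extract_main_header_start; infer_instance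

-- ===== CLAIM (what is proved, stated in full; the proofs are below) =====
def Claim_equal_extract_main_header_start : Prop := ∀ (content : String), Dom_extract_main_header_start content → Spec_extract_main_header_start content (extract_main_header_start content)

-- ===== LEMMAS AND PROOFS =====

-- the marker, as a list of characters
def pvM : List Char := "#include \"src/".toList

lemma nl_not_mem_pvM : '\n' ∉ pvM := by decide

-- reference line splitter (split on '\n')
def splitNL : List Char → List (List Char)
  | [] => [[]]
  | c :: r => if c = '\n' then [] :: splitNL r else (splitNL r).modifyHead (c :: ·)

-- A's break-loop at list-of-char-lists level
def loopC : List (List Char) → List (List Char)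
  | [] => []
  | l :: ls => if PySem.Chars.isIn pvM l then [] else l :: loopC ls

-- list-level versions of the two ports
def AC (cs : List Char) : List Char :=
  PySem.Chars.join ['\n'] (loopC (PySem.Chars.splitOn cs ['\n']))

def BC (cs : List Char) : List Char :=
  let p := PySem.Chars.find cs pvM
  if p = -1 then cs
  else
    let ls := PySem.Chars.rfindFrom cs ['\n'] 0 (some p) + 1
    if ls = 0 then [] else PySem.Chars.slice cs none (some (ls - 1))

lemma splitNL_ne_nil (cs : List Char) : splitNL cs ≠ [] := by
  induction cs with
  | nil => simp [splitNL]
  | cons c r ih =>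
    simp only [splitNL]
    split_ifs
    · simp
    · cases h : splitNL r with
      | nil => exact absurd h ih
      | cons a t => simp [h, List.modifyHead]

lemma splitOn_go_spec (fuel : ℕ) (l cur : List Char) (acc : List (List Char))
    (h : l.length ≤ fuel) :
    PySem.Chars.splitOn.go ['\n'] fuel l cur acc
      = acc.reverse ++ (splitNL l).modifyHead (cur.reverse ++ ·) := by
  induction fuel generalizing l cur acc with
  | zero =>
    have hl : l = [] := List.eq_nil_of_length_eq_zero (Nat.le_zero.mp h)
    subst hl
    simp [PySem.Chars.splitOn.go.eq_1, splitNL, List.modifyHead]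
  | succ fuel ih =>
    cases l with
    | nil =>
      rw [PySem.Chars.splitOn.go.eq_2 _ _ _ _ (by simp)]
      simp [splitNL, List.modifyHead]
    | cons c rest =>
      rw [PySem.Chars.splitOn.go.eq_3]
      by_cases hc : c = '\n'
      · subst hc
        rw [if_pos (by simp [List.isPrefixOf])]
        rw [ih _ _ _ (by simpa using Nat.le_of_succ_le_succ h)]
        cases hr : splitNL rest with
        | nil => exact absurd hr (splitNL_ne_nil rest)
        | cons a t => simp [splitNL, hr, List.modifyHead]
      · rw [if_neg (by simp [List.isPrefixOf, hc]; intro hcc; exact hc hcc.symm)]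
        rw [ih _ _ _ (by simpa using Nat.le_of_succ_le_succ h)]
        cases hr : splitNL rest with
        | nil => exact absurd hr (splitNL_ne_nil rest)
        | cons a t => simp [splitNL, hr, hc, List.modifyHead]

lemma splitOn_eq_splitNL (cs : List Char) : PySem.Chars.splitOn cs ['\n'] = splitNL cs := by
  show PySem.Chars.splitOn.go ['\n'] (cs.length + 1) cs [] [] = splitNL cs
  rw [splitOn_go_spec _ _ _ _ (by omega)]
  cases hr : splitNL cs with
  | nil => exact absurd hr (splitNL_ne_nil cs)
  | cons a t => simp [List.modifyHead]

lemma splitNL_no_nl (l : List Char) (h : '\n' ∉ l) : splitNL l = [l] := by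
  induction l with
  | nil => rfl
  | cons c r ih =>
    have hc : c ≠ '\n' := fun hc => h (hc ▸ List.mem_cons_self)
    have hr : '\n' ∉ r := fun hr => h (List.mem_cons_of_mem _ hr)
    simp [splitNL, hc, ih hr, List.modifyHead]

lemma splitNL_cons_append (l₁ r : List Char) (h : '\n' ∉ l₁) :
    splitNL (l₁ ++ '\n' :: r) = l₁ :: splitNL r := by
  induction l₁ with
  | nil => simp [splitNL]
  | cons c l ih =>
    have hc : c ≠ '\n' := fun hc => h (hc ▸ List.mem_cons_self)
    have hl : '\n' ∉ l := fun hl => h (List.mem_cons_of_mem _ hl)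
    simp only [List.cons_append, splitNL, if_neg hc, ih hl, List.modifyHead]

lemma join_cons_of_ne_nil (x : List Char) (ls : List (List Char)) (h : ls ≠ []) :
    PySem.Chars.join ['\n'] (x :: ls) = x ++ '\n' :: PySem.Chars.join ['\n'] ls := by
  cases ls with
  | nil => exact absurd rfl h
  | cons b t => simp [PySem.Chars.join.eq_1, List.intercalate, List.intersperse]

lemma join_splitNL (cs : List Char) : PySem.Chars.join ['\n'] (splitNL cs) = cs := by
  induction cs with
  | nil => simp [splitNL, PySem.Chars.join_singleton]
  | cons c r ih =>
    by_cases hc : c = '\n'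
    · subst hc
      rw [show splitNL ('\n' :: r) = [] :: splitNL r from by simp [splitNL],
          join_cons_of_ne_nil _ _ (splitNL_ne_nil r), ih]
      simp
    · simp only [splitNL, if_neg hc]
      cases hr : splitNL r with
      | nil => exact absurd hr (splitNL_ne_nil r)
      | cons a t =>
        rw [hr] at ih
        cases t with
        | nil =>
          simp only [List.modifyHead, PySem.Chars.join_singleton] at *
          simp [ih]
        | cons b t' =>
          rw [List.modifyHead]
          calc PySem.Chars.join ['\n'] ((c :: a) :: b :: t')
              = (c :: a) ++ '\n' :: PySem.Chars.join ['\n'] (b :: t') :=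
                join_cons_of_ne_nil (c :: a) (b :: t') (by simp)
            _ = c :: (a ++ '\n' :: PySem.Chars.join ['\n'] (b :: t')) := by simp
            _ = c :: PySem.Chars.join ['\n'] (a :: b :: t') := by
                rw [join_cons_of_ne_nil a (b :: t') (by simp)]
            _ = c :: r := by rw [ih]

lemma head_splitNL (cs a : List Char) (t : List (List Char))
    (h : splitNL cs = a :: t) : a = cs.takeWhile (· ≠ '\n') := by
  induction cs generalizing a t with
  | nil => simp [splitNL] at h; simp [h.1]
  | cons c r ih =>
    by_cases hc : c = '\n'
    · subst hc
      rw [show splitNL ('\n' :: r) = [] :: splitNL r from by simp [splitNL]] at h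
      injection h with h1 h2
      rw [List.takeWhile_cons, if_neg (by simp)]
      exact h1.symm
    · cases hr : splitNL r with
      | nil => exact absurd hr (splitNL_ne_nil r)
      | cons a' t' =>
        rw [show splitNL (c :: r) = (c :: a') :: t' from by
              simp [splitNL, if_neg hc, hr, List.modifyHead]] at h
        injection h with h1 h2
        rw [List.takeWhile_cons, if_pos (by simpa using hc), ← ih a' t' hr]
        exact h1.symm

lemma take_prefix_takeWhile (l : List Char) (k : ℕ)
    (h : ∀ i < k, l[i]? ≠ some '\n') :
    l.take k <+: l.takeWhile (· ≠ '\n') := by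
  induction l generalizing k with
  | nil => simp
  | cons c r ih =>
    cases k with
    | zero => simp
    | succ k =>
      have hc : c ≠ '\n' := by
        intro hcc; exact h 0 (Nat.succ_pos k) (by simp [hcc])
      rw [List.take_succ_cons, List.takeWhile_cons, if_pos (by simpa using hc)]
      exact List.cons_prefix_cons.mpr ⟨rfl, ih k (fun i hi => by
        simpa using h (i + 1) (by omega))⟩

lemma mem_splitNL_infix (cs l : List Char) (h : l ∈ splitNL cs) : l <:+: cs := by
  induction cs generalizing l with
  | nil => simp [splitNL] at h; simp [h]
  | cons c r ih =>
    by_cases hc : c = '\n'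
    · subst hc
      rw [show splitNL ('\n' :: r) = [] :: splitNL r from by simp [splitNL]] at h
      rcases List.mem_cons.mp h with h | h
      · simp [h]
      · exact (ih l h).trans (List.suffix_cons '\n' r).isInfix
    · cases hr : splitNL r with
      | nil => exact absurd hr (splitNL_ne_nil r)
      | cons a' t' =>
        rw [show splitNL (c :: r) = (c :: a') :: t' from by
              simp [splitNL, if_neg hc, hr, List.modifyHead]] at h
        rcases List.mem_cons.mp h with h | h
        · subst h
          have ha : a' <+: r := head_splitNL r a' t' hr ▸ List.takeWhile_prefix _
          exact (List.cons_prefix_cons.mpr ⟨rfl, ha⟩).isInfix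
        · have : l ∈ splitNL r := hr ▸ List.mem_cons_of_mem a' h
          exact (ih l this).trans (List.suffix_cons c r).isInfix

lemma loopC_all_neg (ls : List (List Char)) (h : ∀ l ∈ ls, ¬ pvM <:+: l) : loopC ls = ls := by
  induction ls with
  | nil => rfl
  | cons l ls ih =>
    have hl : PySem.Chars.isIn pvM l = false :=
      (PySem.Chars.isIn_eq_false_iff pvM l).mpr (h l List.mem_cons_self)
    simp only [loopC, hl, Bool.false_eq_true, if_false]
    rw [ih (fun x hx => h x (List.mem_cons_of_mem _ hx))]

-- singleton prefix / drop facts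
lemma singleton_isPrefixOf_drop (l : List Char) (i : ℕ) :
    (['\n'].isPrefixOf (l.drop i)) = true ↔ l[i]? = some '\n' := by
  rw [← List.head?_drop]
  cases hd : l.drop i with
  | nil => simp [List.isPrefixOf]
  | cons x xs => simp [List.isPrefixOf, @eq_comm Char]

-- rfind.go scanning from x downward
lemma rfind_go_no_hit (l : List Char) (x : ℕ)
    (h : ∀ i ≤ x, l[i]? ≠ some '\n') :
    PySem.Chars.rfind.go l ['\n'] x = -1 := by
  induction x with
  | zero =>
    rw [PySem.Chars.rfind.go.eq_1,
        if_neg (fun hc => h 0 (Nat.le_refl 0)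
          ((singleton_isPrefixOf_drop l 0).mp (by simpa using hc)))]
  | succ n ih =>
    rw [PySem.Chars.rfind.go.eq_2,
        if_neg (by simp only [singleton_isPrefixOf_drop]
                   exact h (n + 1) (Nat.le_refl _))]
    exact ih (fun i hi => h i (Nat.le_succ_of_le hi))

lemma rfind_go_hit (l : List Char) (x j : ℕ) (hjx : j ≤ x)
    (hj : l[j]? = some '\n') (hmax : ∀ i, j < i → i ≤ x → l[i]? ≠ some '\n') :
    PySem.Chars.rfind.go l ['\n'] x = j := by
  induction x with
  | zero =>
    have hj0 : j = 0 := Nat.le_zero.mp hjx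
    subst hj0
    rw [PySem.Chars.rfind.go.eq_1,
        if_pos (by have := (singleton_isPrefixOf_drop l 0).mpr hj
                   simpa using this)]
    simp
  | succ n ih =>
    rw [PySem.Chars.rfind.go.eq_2]
    by_cases hje : j = n + 1
    · subst hje
      rw [if_pos ((singleton_isPrefixOf_drop l (n + 1)).mpr hj)]
    · have hjn : j ≤ n := by omega
      rw [if_neg (by simp only [singleton_isPrefixOf_drop]
                     exact hmax (n + 1) (by omega) (Nat.le_refl _))]
      exact ih hjn (fun i hi hin => hmax i hi (Nat.le_succ_of_le hin))

lemma rfind_no_nl (l : List Char) (h : '\n' ∉ l) : PySem.Chars.rfind l ['\n'] = -1 := by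
  show PySem.Chars.rfind.go l ['\n'] l.length = -1
  exact rfind_go_no_hit l l.length (fun i _ hi => h (List.mem_of_getElem? hi))

lemma rfind_mem_spec (l : List Char) (h : '\n' ∈ l) :
    ∃ j : ℕ, PySem.Chars.rfind l ['\n'] = (j : ℤ) ∧ l[j]? = some '\n' ∧
      ∀ i, j < i → l[i]? ≠ some '\n' := by
  classical
  obtain ⟨k, hk, hke⟩ := List.getElem_of_mem h
  have hkP : l[k]? = some '\n' := by rw [List.getElem?_eq_getElem hk, hke]
  set P : ℕ → Prop := fun i => l[i]? = some '\n' with hP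
  have hkn : k ≤ l.length := Nat.le_of_lt hk
  have hj : P (Nat.findGreatest P l.length) := Nat.findGreatest_spec hkn hkP
  refine ⟨Nat.findGreatest P l.length, ?_, hj, ?_⟩
  · show PySem.Chars.rfind.go l ['\n'] l.length = _
    rw [rfind_go_hit l l.length (Nat.findGreatest P l.length)
          (Nat.findGreatest_le _) hj
          (fun i hi hin => Nat.findGreatest_is_greatest hi hin)]
  · intro i hi
    by_cases hin : i ≤ l.length
    · exact Nat.findGreatest_is_greatest hi hin
    · intro hc
      exact hin (Nat.le_of_lt (List.getElem?_eq_some_iff.mp hc).1)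

lemma rfind_append (l₁ l₂ : List Char) :
    PySem.Chars.rfind (l₁ ++ '\n' :: l₂) ['\n']
      = if '\n' ∈ l₂ then ((l₁.length : ℤ) + 1) + PySem.Chars.rfind l₂ ['\n']
        else (l₁.length : ℤ) := by
  have hL : (l₁ ++ '\n' :: l₂)[l₁.length]? = some '\n' := by
    rw [List.getElem?_append_right (Nat.le_refl _)]
    simp
  have hR : ∀ k : ℕ, (l₁ ++ '\n' :: l₂)[l₁.length + 1 + k]? = l₂[k]? := by
    intro k
    rw [List.getElem?_append_right (by omega)]
    have : l₁.length + 1 + k - l₁.length = k + 1 := by omega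
    rw [this]
    simp
  have hlen : (l₁ ++ '\n' :: l₂).length = l₁.length + 1 + l₂.length := by simp; omega
  by_cases h2 : '\n' ∈ l₂
  · obtain ⟨j₂, hj₂, hj₂e, hj₂max⟩ := rfind_mem_spec l₂ h2
    rw [if_pos h2, hj₂]
    show PySem.Chars.rfind.go _ ['\n'] _ = _
    rw [rfind_go_hit _ _ (l₁.length + 1 + j₂)
          (by rw [hlen]
              have : j₂ < l₂.length := (List.getElem?_eq_some_iff.mp hj₂e).1
              omega)
          (by rw [hR]; exact hj₂e)
          (fun i hi hin => by
            have hiL : l₁.length + 1 ≤ i := by omega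
            have : i = l₁.length + 1 + (i - (l₁.length + 1)) := by omega
            rw [this, hR]
            exact hj₂max _ (by omega))]
    push_cast
    ring
  · rw [if_neg h2]
    show PySem.Chars.rfind.go _ ['\n'] _ = _
    rw [rfind_go_hit _ _ l₁.length (by omega) hL
          (fun i hi hin => by
            have : i = l₁.length + 1 + (i - (l₁.length + 1)) := by omega
            rw [this, hR]
            intro hc
            exact h2 (List.mem_of_getElem? hc))]

-- rfindFrom with start 0 and a valid end bound
lemma rfindFrom_zero (cs : List Char) (p : ℤ) (h0 : 0 ≤ p) (hle : p ≤ cs.length) :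
    PySem.Chars.rfindFrom cs ['\n'] 0 (some p) = PySem.Chars.rfind (cs.take p.toNat) ['\n'] := by
  simp only [PySem.Chars.rfindFrom]
  have h1 : (if (cs.length : ℤ) < p then (cs.length : ℤ)
      else if p < 0 then if p + ↑cs.length < 0 then 0 else p + ↑cs.length else p) = p := by
    rw [if_neg (by omega), if_neg (by omega)]
  simp only [h1]
  norm_num
  rw [if_neg (by omega)]
  split_ifs with h2
  · omega
  · simp

lemma infix_iff_exists_drop (sub s : List Char) : sub <:+: s ↔ ∃ j, sub <+: s.drop j := by
  rw [← PySem.Chars.isIn_iff_infix, ← PySem.Chars.exists_prefix_drop_iff_isIn]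

lemma prefix_drop_infix (sub s : List Char) (j : ℕ) (h : sub <+: s.drop j) : sub <:+: s :=
  h.isInfix.trans (List.drop_suffix j s).isInfix

lemma drop_past_line (l₁ rest : List Char) (k : ℕ) :
    (l₁ ++ '\n' :: rest).drop (l₁.length + 1 + k) = rest.drop k := by
  rw [List.drop_append, List.drop_eq_nil_of_le (by omega), List.nil_append,
      show l₁.length + 1 + k - l₁.length = k + 1 from by omega, List.drop_succ_cons]

-- find: uniqueness characterisation
lemma find_eq_of (cs sub : List Char) (j : ℕ) (hj : sub <+: cs.drop j)
    (hmin : ∀ i < j, ¬ sub <+: cs.drop i) : PySem.Chars.find cs sub = (j : ℤ) := by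
  have hin : PySem.Chars.isIn sub cs = true :=
    (PySem.Chars.exists_prefix_drop_iff_isIn sub cs).mp ⟨j, hj⟩
  have hnn : 0 ≤ PySem.Chars.find cs sub := by
    rw [PySem.Chars.find_nonneg_iff]
    exact (PySem.Chars.isIn_iff_infix sub cs).mp hin
  obtain ⟨hpre, hmin'⟩ := PySem.Chars.find_spec hnn
  have h1 : ¬ (PySem.Chars.find cs sub).toNat < j := fun hlt => hmin _ hlt hpre
  have h2 : ¬ j < (PySem.Chars.find cs sub).toNat := fun hlt => hmin' j hlt hj
  omega

-- an occurrence of the marker in l₁ ++ '\n' :: rest lies inside l₁ or inside rest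
lemma occurrence_dichotomy (l₁ rest : List Char) (j : ℕ)
    (h : pvM <+: (l₁ ++ '\n' :: rest).drop j) :
    (j + pvM.length ≤ l₁.length ∧ pvM <+: l₁.drop j)
    ∨ (l₁.length + 1 ≤ j ∧ pvM <+: rest.drop (j - (l₁.length + 1))) := by
  by_cases hj : j ≤ l₁.length
  · by_cases hjm : j + pvM.length ≤ l₁.length
    · left
      refine ⟨hjm, ?_⟩
      rw [List.drop_append_of_le_length hj, List.prefix_iff_eq_take] at h
      rw [List.take_append_of_le_length (by simp; omega)] at h
      rw [h]
      exact List.take_prefix _ _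
    · exfalso
      rw [List.prefix_iff_eq_take] at h
      have hlt : l₁.length - j < pvM.length := by omega
      have hg : (l₁ ++ '\n' :: rest)[l₁.length]? = some '\n' := by
        rw [List.getElem?_append_right (Nat.le_refl _)]
        simp
      have he' : pvM[l₁.length - j]? = some '\n' := by
        conv_lhs => rw [h]
        rw [List.getElem?_take, if_pos hlt, List.getElem?_drop,
            show j + (l₁.length - j) = l₁.length from by omega, hg]
      exact nl_not_mem_pvM (List.mem_of_getElem? he')
  · right
    refine ⟨by omega, ?_⟩
    have hd : (l₁ ++ '\n' :: rest).drop j = rest.drop (j - (l₁.length + 1)) := by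
      rw [List.drop_append]
      rw [List.drop_eq_nil_of_le (by omega), List.nil_append,
          show j - l₁.length = (j - (l₁.length + 1)) + 1 from by omega,
          List.drop_succ_cons]
    rw [hd] at h
    exact h

-- the first occurrence when the marker occurs in the first line
lemma find_in_first (l₁ rest : List Char) (hm : pvM <:+: l₁) :
    ∃ p : ℕ, PySem.Chars.find (l₁ ++ '\n' :: rest) pvM = (p : ℤ)
      ∧ p + pvM.length ≤ l₁.length := by
  obtain ⟨j, hj⟩ := (infix_iff_exists_drop pvM l₁).mp hm
  have hjlen : j + pvM.length ≤ l₁.length := by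
    have h1 := hj.length_le
    rw [List.length_drop] at h1
    have h2 : 0 < pvM.length := by decide
    omega
  have hocc : pvM <+: (l₁ ++ '\n' :: rest).drop j := by
    rw [List.drop_append_of_le_length (by omega)]
    exact hj.trans (List.prefix_append _ _)
  have hnn : 0 ≤ PySem.Chars.find (l₁ ++ '\n' :: rest) pvM := by
    rw [PySem.Chars.find_nonneg_iff]
    exact prefix_drop_infix _ _ j hocc
  obtain ⟨hpre, hmin⟩ := PySem.Chars.find_spec hnn
  rcases occurrence_dichotomy l₁ rest _ hpre with ⟨h1, _⟩ | ⟨h1, _⟩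
  · exact ⟨_, (Int.toNat_of_nonneg hnn).symm, h1⟩
  · exfalso
    have hple : ¬ j < (PySem.Chars.find (l₁ ++ '\n' :: rest) pvM).toNat :=
      fun hlt => hmin j hlt hocc
    have h2 : 0 < pvM.length := by decide
    omega

-- the first occurrence when the marker misses the first line
lemma find_not_first (l₁ rest : List Char) (hm : ¬ pvM <:+: l₁) :
    PySem.Chars.find (l₁ ++ '\n' :: rest) pvM
      = if pvM <:+: rest then ((l₁.length : ℤ) + 1) + PySem.Chars.find rest pvM
        else -1 := by
  by_cases hr : pvM <:+: rest
  · rw [if_pos hr]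
    have hp' : 0 ≤ PySem.Chars.find rest pvM := (PySem.Chars.find_nonneg_iff rest pvM).mpr hr
    obtain ⟨hpre', hmin'⟩ := PySem.Chars.find_spec hp'
    rw [find_eq_of (l₁ ++ '\n' :: rest) pvM
          (l₁.length + 1 + (PySem.Chars.find rest pvM).toNat)
          (by rw [drop_past_line]; exact hpre')
          (fun i hi hocc => by
            rcases occurrence_dichotomy l₁ rest i hocc with ⟨_, h2⟩ | ⟨h1, h2⟩
            · exact hm (prefix_drop_infix _ _ _ h2)
            · exact hmin' (i - (l₁.length + 1)) (by omega) h2)]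
    push_cast [Int.toNat_of_nonneg hp']
    ring
  · rw [if_neg hr, PySem.Chars.find_eq_neg_one_iff]
    intro hin
    obtain ⟨j, hj⟩ := (infix_iff_exists_drop pvM _).mp hin
    rcases occurrence_dichotomy l₁ rest j hj with ⟨_, h2⟩ | ⟨_, h2⟩
    · exact hm (prefix_drop_infix _ _ _ h2)
    · exact hr (prefix_drop_infix _ _ _ h2)

lemma take_past_line (l₁ rest : List Char) (k : ℕ) :
    (l₁ ++ '\n' :: rest).take (l₁.length + 1 + k) = l₁ ++ '\n' :: rest.take k := by
  rw [List.take_append, List.take_of_length_le (by omega),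
      show l₁.length + 1 + k - l₁.length = k + 1 from by omega, List.take_succ_cons]

-- the no-newline case
lemma mainC_no_nl (cs : List Char) (hnl : '\n' ∉ cs) : AC cs = BC cs := by
  unfold AC BC
  rw [splitOn_eq_splitNL, splitNL_no_nl cs hnl]
  by_cases hmc : pvM <:+: cs
  · have hisin : PySem.Chars.isIn pvM cs = true := (PySem.Chars.isIn_iff_infix pvM cs).mpr hmc
    have hnn : 0 ≤ PySem.Chars.find cs pvM := (PySem.Chars.find_nonneg_iff cs pvM).mpr hmc
    simp only [loopC, hisin, if_true, PySem.Chars.join_nil]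
    rw [if_neg (by omega), rfindFrom_zero _ _ hnn (PySem.Chars.find_le_length cs pvM),
        rfind_no_nl _ (fun hmem => hnl (List.mem_of_mem_take hmem))]
    norm_num
  · have hisin : PySem.Chars.isIn pvM cs = false := (PySem.Chars.isIn_eq_false_iff pvM cs).mpr hmc
    have hf : PySem.Chars.find cs pvM = -1 := (PySem.Chars.find_eq_neg_one_iff cs pvM).mpr hmc
    simp only [loopC, hisin, Bool.false_eq_true, if_false, PySem.Chars.join_singleton]
    rw [hf, if_pos rfl]

-- the step case: one line peeled off
lemma mainC_step (l₁ rest : List Char) (h1 : '\n' ∉ l₁) (ih : AC rest = BC rest) :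
    AC (l₁ ++ '\n' :: rest) = BC (l₁ ++ '\n' :: rest) := by
  have hlen : (l₁ ++ '\n' :: rest).length = l₁.length + 1 + rest.length := by
    simp
    omega
  have hsplit : PySem.Chars.splitOn (l₁ ++ '\n' :: rest) ['\n'] = l₁ :: splitNL rest := by
    rw [splitOn_eq_splitNL, splitNL_cons_append _ _ h1]
  have hm0 : 0 < pvM.length := by decide
  by_cases hm1 : pvM <:+: l₁
  · -- marker in the first line: both sides give []
    have hisin : PySem.Chars.isIn pvM l₁ = true := (PySem.Chars.isIn_iff_infix _ _).mpr hm1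
    obtain ⟨p, hp, hple⟩ := find_in_first l₁ rest hm1
    unfold AC BC
    rw [hsplit, hp]
    simp only [loopC, hisin, if_true, PySem.Chars.join_nil]
    rw [if_neg (by omega), rfindFrom_zero _ _ (by omega) (by rw [hlen]; push_cast; omega),
        show ((p : ℤ)).toNat = p from by omega,
        List.take_append_of_le_length (by omega),
        rfind_no_nl _ (fun hmem => h1 (List.mem_of_mem_take hmem))]
    norm_num
  · have hisin1 : PySem.Chars.isIn pvM l₁ = false := (PySem.Chars.isIn_eq_false_iff _ _).mpr hm1
    by_cases hm2 : pvM <:+: rest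
    · -- marker first occurs in rest
      have hp' : 0 ≤ PySem.Chars.find rest pvM := (PySem.Chars.find_nonneg_iff _ _).mpr hm2
      set k := (PySem.Chars.find rest pvM).toNat with hk
      have hpk : PySem.Chars.find rest pvM = (k : ℤ) := by omega
      have hkle : k ≤ rest.length := by
        have := PySem.Chars.find_le_length rest pvM
        omega
      have hfind : PySem.Chars.find (l₁ ++ '\n' :: rest) pvM = ((l₁.length + 1 + k : ℕ) : ℤ) := by
        rw [find_not_first _ _ hm1, if_pos hm2, hpk]
        push_cast
        ring
      obtain ⟨hpre', hmin'⟩ := PySem.Chars.find_spec hp'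
      rw [← hk] at hpre' hmin'
      cases hsr : splitNL rest with
      | nil => exact absurd hsr (splitNL_ne_nil rest)
      | cons f t =>
      have hf : f = rest.takeWhile (· ≠ '\n') := head_splitNL rest f t hsr
      by_cases ht : '\n' ∈ rest.take k
      · -- a newline precedes the first occurrence: both keep full lines before it
        obtain ⟨j₂, hj₂, hj₂e, hj₂m⟩ := rfind_mem_spec _ ht
        have hBrest : BC rest = rest.take j₂ := by
          unfold BC
          rw [hpk, if_neg (by omega), rfindFrom_zero _ _ (by omega) (by omega),
              show ((k : ℤ)).toNat = k from by omega, hj₂, if_neg (by omega),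
              show ((j₂ : ℤ) + 1 - 1) = (j₂ : ℤ) from by ring,
              PySem.Chars.slice_eq_listSlice, PySem.List.slice_to _ (by omega),
              show ((j₂ : ℤ)).toNat = j₂ from by omega]
        have hfin : PySem.Chars.isIn pvM f = false := by
          rw [PySem.Chars.isIn_eq_false_iff]
          intro hinf
          obtain ⟨kk, hkk⟩ := (infix_iff_exists_drop _ _).mp hinf
          have hfp : f <+: rest := hf ▸ List.takeWhile_prefix _
          have hocc : pvM <+: rest.drop kk := hkk.trans (hfp.drop kk)
          have hkkk : ¬ kk < k := fun hlt => hmin' kk hlt hocc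
          have hkklen : kk + pvM.length ≤ f.length := by
            have h2 := hkk.length_le
            rw [List.length_drop] at h2
            omega
          obtain ⟨i, hm', hie⟩ := List.mem_take_iff_getElem.mp ht
          have hil : i < f.length := by omega
          have hif : '\n' ∈ f := by
            have h3 : f[i] = rest[i]'(by omega) := hfp.getElem hil
            rw [hie] at h3
            exact h3 ▸ List.getElem_mem hil
          rw [hf] at hif
          simpa using List.mem_takeWhile_imp hif
        have hACrest : PySem.Chars.join ['\n'] (f :: loopC t) = rest.take j₂ := by
          rw [← hBrest, ← ih]
          unfold AC
          rw [splitOn_eq_splitNL, hsr]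
          simp only [loopC, hfin, Bool.false_eq_true, if_false]
        unfold AC BC
        rw [hsplit, hfind]
        simp only [loopC, hisin1, Bool.false_eq_true, if_false]
        rw [hsr]
        simp only [loopC, hfin, Bool.false_eq_true, if_false]
        rw [join_cons_of_ne_nil _ _ (by simp), hACrest,
            if_neg (by omega), rfindFrom_zero _ _ (by omega) (by rw [hlen]; push_cast; omega),
            show ((l₁.length + 1 + k : ℕ) : ℤ).toNat = l₁.length + 1 + k from by omega,
            take_past_line, rfind_append, if_pos ht, hj₂, if_neg (by omega),
            show ((l₁.length : ℤ) + 1 + j₂ + 1 - 1) = ((l₁.length + 1 + j₂ : ℕ) : ℤ) from by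
              push_cast; ring,
            PySem.Chars.slice_eq_listSlice, PySem.List.slice_to _ (by omega),
            show ((l₁.length + 1 + j₂ : ℕ) : ℤ).toNat = l₁.length + 1 + j₂ from by omega,
            take_past_line]
      · -- no newline before the first occurrence: it is in the first line of rest
        have hrneg : PySem.Chars.rfind (rest.take k) ['\n'] = -1 := rfind_no_nl _ ht
        have hnlk : ∀ i < k + pvM.length, rest[i]? ≠ some '\n' := by
          intro i hi hcon
          have hir : i < rest.length := (List.getElem?_eq_some_iff.mp hcon).1
          by_cases hik : i < k
          · exact ht (List.mem_take_iff_getElem.mpr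
              ⟨i, by omega, by
                have := List.getElem?_eq_getElem (l := rest) (i := i) hir
                rw [hcon] at this
                exact (Option.some.inj this).symm⟩)
          · have him : i - k < pvM.length := by omega
            have hdg : (rest.drop k)[i - k]? = some '\n' := by
              rw [List.getElem?_drop, show k + (i - k) = i from by omega]
              exact hcon
            have h3 := hpre'.getElem (i := i - k) him
            have h4 : pvM[i - k]? = some '\n' := by
              rw [List.getElem?_eq_getElem him, h3, ← List.getElem?_eq_getElem]
              exact hdg
            exact nl_not_mem_pvM (List.mem_of_getElem? h4)
        have htp : rest.take (k + pvM.length) <+: f := hf ▸ take_prefix_takeWhile rest _ hnlk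
        have hinf : pvM <:+: f := by
          obtain ⟨q, hq⟩ : ∃ q, q = k + pvM.length := ⟨_, rfl⟩
          have hmeq : pvM = (rest.take q).drop k := by
            rw [hq, List.drop_take, show k + pvM.length - k = pvM.length from by omega]
            exact List.prefix_iff_eq_take.mp hpre'
          have hsuf : pvM <:+ rest.take q := by
            rw [hmeq]
            exact List.drop_suffix _ _
          exact hsuf.isInfix.trans ((hq ▸ htp : rest.take q <+: f)).isInfix
        have hfin : PySem.Chars.isIn pvM f = true := (PySem.Chars.isIn_iff_infix _ _).mpr hinf
        unfold AC BC
        rw [hsplit, hfind]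
        simp only [loopC, hisin1, Bool.false_eq_true, if_false]
        rw [hsr]
        simp only [loopC, hfin, if_true]
        rw [PySem.Chars.join_singleton,
            if_neg (by omega), rfindFrom_zero _ _ (by omega) (by rw [hlen]; push_cast; omega),
            show ((l₁.length + 1 + k : ℕ) : ℤ).toNat = l₁.length + 1 + k from by omega,
            take_past_line, rfind_append, if_neg ht, if_neg (by omega),
            show ((l₁.length : ℤ) + 1 - 1) = ((l₁.length : ℕ) : ℤ) from by push_cast; ring,
            PySem.Chars.slice_eq_listSlice, PySem.List.slice_to _ (by omega),
            show ((l₁.length : ℕ) : ℤ).toNat = l₁.length from by omega,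
            List.take_append_of_le_length (Nat.le_refl _), List.take_length]
    · -- marker nowhere: everything is kept
      have hfneg : PySem.Chars.find (l₁ ++ '\n' :: rest) pvM = -1 := by
        rw [find_not_first _ _ hm1, if_neg hm2]
      have hloop : loopC (splitNL rest) = splitNL rest :=
        loopC_all_neg _ (fun l hl hc => hm2 (hc.trans (mem_splitNL_infix rest l hl)))
      unfold AC BC
      rw [hsplit, hfneg, if_pos rfl]
      simp only [loopC, hisin1, Bool.false_eq_true, if_false]
      rw [hloop, join_cons_of_ne_nil _ _ (splitNL_ne_nil rest), join_splitNL]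

-- main list-level equivalence
lemma mainC (cs : List Char) : AC cs = BC cs := by
  suffices h : ∀ n (cs : List Char), cs.length ≤ n → AC cs = BC cs from
    h cs.length cs (Nat.le_refl _)
  intro n
  induction n with
  | zero =>
    intro cs hl
    have hc : cs = [] := List.eq_nil_of_length_eq_zero (Nat.le_zero.mp hl)
    subst hc
    exact mainC_no_nl [] (by simp)
  | succ n ih =>
    intro cs hl
    by_cases hnl : '\n' ∈ cs
    · have hdw : cs.dropWhile (· ≠ '\n') ≠ [] := by
        rw [Ne, List.dropWhile_eq_nil_iff]
        push_neg
        exact ⟨'\n', hnl, by simp⟩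
      obtain ⟨d, rest, hdr⟩ : ∃ d rest, cs.dropWhile (· ≠ '\n') = d :: rest := by
        cases h : cs.dropWhile (· ≠ '\n') with
        | nil => exact absurd h hdw
        | cons d rest => exact ⟨d, rest, rfl⟩
      have hd : d = '\n' := by
        have hnp := List.head_dropWhile_not (fun c => decide (c ≠ '\n')) hdw
        have hh : (cs.dropWhile (· ≠ '\n')).head hdw = d := by
          have h1' : (cs.dropWhile (· ≠ '\n')).head? = some d := by rw [hdr]; rfl
          rw [List.head?_eq_head hdw] at h1'
          exact Option.some.inj h1'
        rw [hh] at hnp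
        simpa using hnp
      subst hd
      have hcs : cs = cs.takeWhile (· ≠ '\n') ++ '\n' :: rest := by
        conv_lhs => rw [← List.takeWhile_append_dropWhile (p := fun c => decide (c ≠ '\n')) (l := cs)]
        rw [hdr]
      have hnl1 : '\n' ∉ cs.takeWhile (· ≠ '\n') := fun hm => by
        simpa using List.mem_takeWhile_imp hm
      have hrl : rest.length ≤ n := by
        have h2 := congrArg List.length hcs
        simp at h2
        omega
      rw [hcs]
      exact mainC_step _ rest hnl1 (ih rest hrl)
    · exact mainC_no_nl cs hnl

-- bridges to the String ports
lemma loopA_map (xs : List (List Char)) :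
    pvLoopA (xs.map String.ofList) = (loopC xs).map String.ofList := by
  induction xs with
  | nil => rfl
  | cons l ls ih =>
    simp only [List.map_cons, pvLoopA, loopC]
    rw [show PySem.Str.isIn "#include \"src/" (String.ofList l) = PySem.Chars.isIn pvM l from by
          rw [PySem.Str.isIn_eq, String.toList_ofList]; simp [pvM]]
    split_ifs
    · rfl
    · simp only [List.map_cons, ih]

lemma portA_toList (content : String) :
    (extract_main_header_start content).toList = AC content.toList := by
  have hsplit : PySem.Str.split? content "\n"
      = some ((PySem.Chars.splitOn content.toList ['\n']).map String.ofList) := by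
    show Option.map _ (PySem.Chars.split? content.toList "\n".toList) = _
    rw [show "\n".toList = ['\n'] from rfl, PySem.Chars.split?.eq_1, if_neg (by simp)]
    rfl
  unfold AC
  show (PySem.Str.join "\n" (pvLoopA ((PySem.Str.split? content "\n").getD []))).toList = _
  rw [hsplit, Option.getD_some, loopA_map, PySem.Str.toList_join,
      show "\n".toList = ['\n'] from rfl, List.map_map]
  congr 1
  simp [Function.comp_def]

lemma portB_toList (content : String) :
    (extract_main_header_start_alt content).toList = BC content.toList := by
  show (if PySem.Str.find content "#include \"src/" = -1 then content
      else if PySem.Str.rfindFrom content "\n" 0 (some (PySem.Str.find content "#include \"src/")) + 1 = 0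
        then ""
        else PySem.Str.slice content none
          (some (PySem.Str.rfindFrom content "\n" 0 (some (PySem.Str.find content "#include \"src/")) + 1 - 1))).toList
    = if PySem.Chars.find content.toList pvM = -1 then content.toList
      else if PySem.Chars.rfindFrom content.toList ['\n'] 0 (some (PySem.Chars.find content.toList pvM)) + 1 = 0
        then []
        else PySem.Chars.slice content.toList none
          (some (PySem.Chars.rfindFrom content.toList ['\n'] 0 (some (PySem.Chars.find content.toList pvM)) + 1 - 1))
  rw [show PySem.Str.find content "#include \"src/" = PySem.Chars.find content.toList pvM from by
        simp [PySem.Str.find, pvM]]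
  rw [PySem.Str.rfindFrom_eq, show ("\n").toList = ['\n'] from rfl]
  split_ifs
  · rfl
  · rfl
  · rw [PySem.Str.toList_slice]

-- ===== VERDICT (by name: the statement is the Claim_ definition above) =====
theorem extract_main_header_start_spec : Claim_equal_extract_main_header_start := by
  intro content _
  unfold Spec_extract_main_header_start
  have h : (extract_main_header_start content).toList = (extract_main_header_start_alt content).toList := by
    rw [portA_toList, portB_toList, mainC]
  calc extract_main_header_start content
      = String.ofList (extract_main_header_start content).toList := String.ofList_toList.symm
    _ = String.ofList (extract_main_header_start_alt content).toList := by rw [h]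
    _ = extract_main_header_start_alt content := String.ofList_toList
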